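-- pv_equiv track=rewrite | github.com/johnlplaw/MyDevProject | trial/SpellingCorrection.py | remove_repeated_chars
-- ===== SOURCE A (Python) =====
-- def remove_repeated_chars(input_string):
--     result = []
--     count = 1
--
--     for i in range(len(input_string)):
--         # Check if the current character is the same as the next one
--         if i < len(input_string) - 1 and input_string[i] == input_string[i + 1]:
--             count += 1
--         else:
--             # If the count is 2 or less, add the characters to the result
--             if count <= 2:
--                 result.extend([input_string[i]] * count)
--             count = 1
--
--     return ''.join(result)
-- ===== SOURCE B (Python) =====
-- def remove_repeated_chars(input_string):
--     s = input_string
--     n = len(s)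
--
--     def triple(j):
--         # three consecutive equal characters starting at j
--         return j + 3 <= n and s[j] == s[j + 1] == s[j + 2]
--
--     def keep(i):
--         # s[i] survives iff it lies in no window of three equal characters,
--         # i.e. its maximal run has length <= 2
--         return not (triple(i) or (i >= 1 and triple(i - 1)) or (i >= 2 and triple(i - 2)))
--
--     return ''.join(s[i] for i in range(n) if keep(i))
-- ===== Notes on version B (the rewrite author's own statement) =====
-- stated objective: alternative
-- what changed: Replaces A's stateful run-counting loop by a stateless per-index filter: character i is kept iff no window of three consecutive equal characters contains position i, which holds exactly when i's maximal run has length at most 2.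
import Mathlib
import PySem

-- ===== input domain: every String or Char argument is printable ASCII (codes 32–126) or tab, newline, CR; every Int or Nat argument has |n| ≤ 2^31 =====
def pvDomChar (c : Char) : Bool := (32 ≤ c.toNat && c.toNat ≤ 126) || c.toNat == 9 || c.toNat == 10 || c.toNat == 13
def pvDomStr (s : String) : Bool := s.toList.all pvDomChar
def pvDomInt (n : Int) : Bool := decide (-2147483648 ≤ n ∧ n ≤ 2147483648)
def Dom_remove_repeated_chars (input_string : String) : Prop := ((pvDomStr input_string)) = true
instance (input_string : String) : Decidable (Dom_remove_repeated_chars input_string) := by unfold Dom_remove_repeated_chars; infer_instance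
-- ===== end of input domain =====

-- B replaces A's stateful run-counting loop by a stateless per-index filter (alternative, same cost).

-- ===== PORT A =====
-- A's loop over i in range(len(input_string)) reads only input_string[i] and
-- input_string[i+1]; ported as structural recursion carrying the same state
-- (result, count); the i < len-1 ∧ s[i] == s[i+1] test is the match on the tail.
def pvLoopA : List Char → List Char → Nat → List Char
  | [], result, _ => result
  | c :: rest, result, count =>
    match rest with
    | c' :: _ =>
      if c == c' then pvLoopA rest result (count + 1)
      else pvLoopA rest (if count ≤ 2 then result ++ List.replicate count c else result) 1
    | [] => if count ≤ 2 then result ++ List.replicate count c else result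

def remove_repeated_chars (input_string : String) : String :=
  String.mk (pvLoopA input_string.toList [] 1)

-- ===== PORT B =====
-- Source B's triple(j): three consecutive equal characters starting at j
-- (the j+3 <= n guard makes the getD defaults unreachable).
def pvTriple (cs : List Char) (j : Nat) : Bool :=
  decide (j + 3 ≤ cs.length) && (cs.getD j ' ' == cs.getD (j + 1) ' ')
    && (cs.getD (j + 1) ' ' == cs.getD (j + 2) ' ')

-- Source B's keep(i): s[i] survives iff no window of three equal characters contains i.
def pvKeep (cs : List Char) (i : Nat) : Bool :=
  !(pvTriple cs i || (decide (1 ≤ i) && pvTriple cs (i - 1))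
    || (decide (2 ≤ i) && pvTriple cs (i - 2)))

-- ''.join(s[i] for i in range(n) if keep(i))
def remove_repeated_chars_alt (input_string : String) : String :=
  String.mk (((List.range input_string.toList.length).filter
      (pvKeep input_string.toList)).map (fun i => input_string.toList.getD i ' '))

-- ===== PRECONDITION & SPEC =====
def Spec_remove_repeated_chars (input_string : String) (out : String) : Prop := out = remove_repeated_chars_alt input_string
instance (input_string : String) (out : String) : Decidable (Spec_remove_repeated_chars input_string out) := by unfold Spec_remove_repeated_chars; infer_instance

-- ===== CLAIM (what is proved, stated in full; the proofs are below) =====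
def Claim_equal_remove_repeated_chars : Prop := ∀ (input_string : String), Dom_remove_repeated_chars input_string → Spec_remove_repeated_chars input_string (remove_repeated_chars input_string)

-- ===== LEMMAS AND PROOFS =====

-- proof-side intermediate: run decomposition of the string
def pvRunGo : List Char → List Char
  | [] => []
  | c :: rest =>
    let run := rest.takeWhile (· == c)
    (if run.length + 1 ≤ 2 then c :: run else []) ++ pvRunGo (rest.dropWhile (· == c))
termination_by l => l.length
decreasing_by
  simp only [List.length_cons]
  exact Nat.lt_succ_of_le (List.length_dropWhile_le _ _)

-- proof-side name for the body of remove_repeated_chars_alt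
def pvFilterList (cs : List Char) : List Char :=
  ((List.range cs.length).filter (pvKeep cs)).map (fun i => cs.getD i ' ')

theorem alt_eq_filterList (s : String) :
    remove_repeated_chars_alt s = String.mk (pvFilterList s.toList) := rfl

-- ---------- A-side: pvLoopA = pvRunGo (run decomposition) ----------

theorem pvLoopA_nil (res : List Char) (k : Nat) : pvLoopA [] res k = res := rfl

theorem pvLoopA_single (c : Char) (res : List Char) (k : Nat) :
    pvLoopA [c] res k = if k ≤ 2 then res ++ List.replicate k c else res := rfl

theorem pvLoopA_cons₂ (c c' : Char) (rest : List Char) (res : List Char) (k : Nat) :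
    pvLoopA (c :: c' :: rest) res k =
      if c == c' then pvLoopA (c' :: rest) res (k + 1)
      else pvLoopA (c' :: rest) (if k ≤ 2 then res ++ List.replicate k c else res) 1 := rfl

theorem pvLoopA_acc (l : List Char) : ∀ (res : List Char) (k : Nat),
    pvLoopA l res k = res ++ pvLoopA l [] k := by
  induction l with
  | nil => intro res k; simp [pvLoopA_nil]
  | cons c rest ih =>
    intro res k
    match rest with
    | [] =>
      rw [pvLoopA_single, pvLoopA_single]
      split <;> simp
    | c' :: rest' =>
      rw [pvLoopA_cons₂, pvLoopA_cons₂]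
      by_cases h : c == c'
      · rw [if_pos h, if_pos h, ih]
      · rw [if_neg h, if_neg h, ih, ih (if k ≤ 2 then [] ++ List.replicate k c else [])]
        split <;> simp

theorem takeWhile_eq_replicate (c : Char) : ∀ (l : List Char),
    l.takeWhile (· == c) = List.replicate (l.takeWhile (· == c)).length c := by
  intro l
  induction l with
  | nil => simp
  | cons x xs ih =>
    by_cases h : x == c
    · have hx : x = c := (beq_iff_eq).mp h
      simp only [List.takeWhile, h, List.length_cons, List.replicate_succ]
      rw [hx]
      exact congrArg (List.cons c) ih
    · simp [List.takeWhile, h]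

theorem pvLoopA_run : ∀ (l : List Char) (c : Char) (k : Nat),
    pvLoopA (c :: l) [] k =
      (if (l.takeWhile (· == c)).length + k ≤ 2
        then List.replicate ((l.takeWhile (· == c)).length + k) c else [])
      ++ pvRunGo (l.dropWhile (· == c)) := by
  intro l
  induction l with
  | nil =>
    intro c k
    rw [pvLoopA_single]
    simp [pvRunGo]
  | cons c' rest ih =>
    intro c k
    rw [pvLoopA_cons₂]
    by_cases h : c == c'
    · have hc : c = c' := (beq_iff_eq).mp h
      subst hc
      rw [if_pos h, ih c (k + 1)]
      have ht : (c :: rest).takeWhile (· == c) = c :: rest.takeWhile (· == c) := by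
        simp [List.takeWhile]
      have hd : (c :: rest).dropWhile (· == c) = rest.dropWhile (· == c) := by
        simp [List.dropWhile]
      rw [ht, hd]
      have harith : (rest.takeWhile (· == c)).length + (k + 1)
          = (c :: rest.takeWhile (· == c)).length + k := by
        simp; omega
      rw [harith]
    · have h' : (c' == c) = false := by
        simp only [beq_eq_false_iff_ne]
        exact fun hh => (by simp [hh] at h)
      rw [if_neg h, pvLoopA_acc, ih c' 1]
      have ht : (c' :: rest).takeWhile (· == c) = [] := by
        simp [List.takeWhile, h']
      have hd : (c' :: rest).dropWhile (· == c) = c' :: rest := by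
        simp [List.dropWhile, h']
      rw [ht, hd]
      have hAlt : pvRunGo (c' :: rest) =
          (if (rest.takeWhile (· == c')).length + 1 ≤ 2
            then c' :: rest.takeWhile (· == c') else [])
          ++ pvRunGo (rest.dropWhile (· == c')) := by
        simp [pvRunGo]
      rw [hAlt]
      have hrun : List.replicate ((rest.takeWhile (· == c')).length + 1) c'
          = c' :: rest.takeWhile (· == c') := by
        rw [List.replicate_succ]
        congr 1
        exact (takeWhile_eq_replicate c' rest).symm
      simp only [List.length_nil, Nat.zero_add, hrun]
      split <;> simp

theorem pvLoopA_eq_pvRunGo (l : List Char) : pvLoopA l [] 1 = pvRunGo l := by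
  match l with
  | [] => simp [pvLoopA_nil, pvRunGo]
  | c :: rest =>
    rw [pvLoopA_run rest c 1]
    have hrun : List.replicate ((rest.takeWhile (· == c)).length + 1) c
        = c :: rest.takeWhile (· == c) := by
      rw [List.replicate_succ]
      congr 1
      exact (takeWhile_eq_replicate c rest).symm
    simp only [pvRunGo, hrun]

-- ---------- B-side: pvFilterList = pvRunGo ----------

theorem getD_run (L : Nat) (c : Char) (rest : List Char) (k : Nat) :
    (List.replicate L c ++ rest).getD k ' ' = if k < L then c else rest.getD (k - L) ' ' := by
  by_cases h : k < L
  · rw [if_pos h]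
    rw [List.getD_append _ _ _ _ (by simpa using h)]
    simp [List.getD, h]
  · rw [if_neg h]
    rw [List.getD_append_right _ _ _ _ (by simpa using Nat.le_of_not_lt h)]
    simp

-- pvTriple on replicate L c ++ rest, window fully before the boundary
theorem head_getD (rest : List Char) (d : Char) (hne : rest ≠ []) :
    rest.head? = some (rest.getD 0 d) := by
  cases rest with
  | nil => exact absurd rfl hne
  | cons x xs => simp [List.getD]

theorem pvTriple_lt (L : Nat) (c : Char) (rest : List Char) (j : Nat)
    (hhead : ∀ d, rest.head? = some d → d ≠ c) (hj : j < L) :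
    pvTriple (List.replicate L c ++ rest) j = decide (j + 3 ≤ L) := by
  unfold pvTriple
  simp only [getD_run, List.length_append, List.length_replicate]
  by_cases h3 : j + 3 ≤ L
  · rw [decide_eq_true h3]
    have g : j + 3 ≤ L + rest.length := by omega
    rw [decide_eq_true g, if_pos hj, if_pos (by omega : j + 1 < L), if_pos (by omega : j + 2 < L)]
    simp
  · rw [decide_eq_false h3]
    by_cases hg : j + 3 ≤ L + rest.length
    · -- rest nonempty, boundary crossed
      have hrest : rest ≠ [] := by
        intro h; subst h; simp at hg; omega
      have hfst := hhead (rest.getD 0 ' ') (head_getD rest ' ' hrest)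
      rw [decide_eq_true hg]
      by_cases h1 : j + 1 < L
      · -- then j + 2 = L
        have h2 : ¬ j + 2 < L := by omega
        have e2 : j + 2 - L = 0 := by omega
        rw [if_pos hj, if_pos h1, if_neg h2, e2]
        have hne : ¬ c = rest.getD 0 ' ' := fun h => hfst h.symm
        simp only [List.getD] at hne
        simp [hne]
      · -- j + 1 = L
        have e1 : j + 1 - L = 0 := by omega
        rw [if_pos hj, if_neg h1, e1]
        have hne : ¬ c = rest.getD 0 ' ' := fun h => hfst h.symm
        simp only [List.getD] at hne
        simp [hne]
    · rw [decide_eq_false hg]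
      simp

theorem pvTriple_ge (L : Nat) (c : Char) (rest : List Char) (j : Nat) (hj : L ≤ j) :
    pvTriple (List.replicate L c ++ rest) j = pvTriple rest (j - L) := by
  unfold pvTriple
  simp only [getD_run, List.length_append, List.length_replicate]
  rw [if_neg (by omega), if_neg (by omega), if_neg (by omega)]
  have e1 : j + 1 - L = j - L + 1 := by omega
  have e2 : j + 2 - L = j - L + 2 := by omega
  rw [e1, e2]
  congr 1
  · congr 1
    exact decide_eq_decide.mpr (by omega)

theorem pvKeep_lt (L : Nat) (c : Char) (rest : List Char) (i : Nat)
    (hhead : ∀ d, rest.head? = some d → d ≠ c) (hi : i < L) :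
    pvKeep (List.replicate L c ++ rest) i = decide (L ≤ 2) := by
  unfold pvKeep
  rw [pvTriple_lt L c rest i hhead hi,
      pvTriple_lt L c rest (i-1) hhead (by omega),
      pvTriple_lt L c rest (i-2) hhead (by omega)]
  by_cases hL : L ≤ 2
  · rw [decide_eq_true hL]
    rw [decide_eq_false (by omega : ¬ (i + 3 ≤ L)),
        decide_eq_false (by omega : ¬ (i - 1 + 3 ≤ L)),
        decide_eq_false (by omega : ¬ (i - 2 + 3 ≤ L))]
    simp
  · rw [decide_eq_false hL]
    by_cases hA : i + 3 ≤ L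
    · rw [decide_eq_true hA]; simp
    · by_cases hB : i + 2 ≤ L
      · rw [decide_eq_true (show 1 ≤ i by omega), decide_eq_true (show i - 1 + 3 ≤ L by omega)]
        simp
      · rw [decide_eq_true (show 2 ≤ i by omega), decide_eq_true (show i - 2 + 3 ≤ L by omega)]
        simp

theorem pvKeep_shift (L : Nat) (c : Char) (rest : List Char) (i : Nat)
    (hhead : ∀ d, rest.head? = some d → d ≠ c) (hL : 1 ≤ L) :
    pvKeep (List.replicate L c ++ rest) (L + i) = pvKeep rest i := by
  unfold pvKeep
  congr 1
  have e0 : L + i - L = i := by omega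
  rw [pvTriple_ge L c rest (L+i) (by omega), e0]
  congr 1
  · -- middle disjunct
    by_cases h1 : 1 ≤ i
    · rw [decide_eq_true (by omega : 1 ≤ L + i), decide_eq_true h1,
        pvTriple_ge L c rest (L+i-1) (by omega)]
      have : L + i - 1 - L = i - 1 := by omega
      rw [this]
    · have hi0 : i = 0 := by omega
      subst hi0
      rw [decide_eq_true (by omega : 1 ≤ L + 0)]
      rw [pvTriple_lt L c rest (L + 0 - 1) hhead (by omega),
        decide_eq_false (by omega : ¬ (L + 0 - 1 + 3 ≤ L))]
      simp
  · -- last disjunct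
    by_cases h2 : 2 ≤ i
    · rw [decide_eq_true (by omega : 2 ≤ L + i), decide_eq_true h2,
        pvTriple_ge L c rest (L+i-2) (by omega)]
      have : L + i - 2 - L = i - 2 := by omega
      rw [this]
    · by_cases hg : 2 ≤ L + i
      · rw [decide_eq_true hg]
        rw [pvTriple_lt L c rest (L + i - 2) hhead (by omega),
          decide_eq_false (by omega : ¬ (L + i - 2 + 3 ≤ L))]
        simp [h2]
      · rw [decide_eq_false hg, decide_eq_false (by omega : ¬ (2 ≤ i))]
        simp

theorem filterList_run (L : Nat) (c : Char) (rest : List Char)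
    (hhead : ∀ d, rest.head? = some d → d ≠ c) (hL : 1 ≤ L) :
    pvFilterList (List.replicate L c ++ rest)
      = (if L ≤ 2 then List.replicate L c else []) ++ pvFilterList rest := by
  unfold pvFilterList
  rw [show (List.replicate L c ++ rest).length = L + rest.length by simp]
  rw [List.range_add, List.filter_append, List.map_append]
  congr 1
  · -- first run
    rw [List.filter_congr (fun i hi => by
      rw [pvKeep_lt L c rest i hhead (List.mem_range.mp hi)] :
      ∀ i ∈ List.range L, pvKeep (List.replicate L c ++ rest) i = (fun _ => decide (L ≤ 2)) i)]
    by_cases hL2 : L ≤ 2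
    · rw [if_pos hL2]
      rw [show (List.range L).filter (fun _ => decide (L ≤ 2)) = List.range L by
        rw [decide_eq_true hL2]; simp]
      rw [List.map_congr_left (fun i hi => by
        rw [getD_run, if_pos (List.mem_range.mp hi)] :
        ∀ i ∈ List.range L, (List.replicate L c ++ rest).getD i ' ' = (fun _ => c) i)]
      simp [List.map_const']
    · rw [if_neg hL2]
      rw [decide_eq_false hL2]
      simp
  · -- shifted suffix
    rw [List.filter_map]
    rw [List.filter_congr (fun i _ => by
      simp only [Function.comp]
      rw [pvKeep_shift L c rest i hhead hL] :
      ∀ i ∈ List.range rest.length,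
        ((pvKeep (List.replicate L c ++ rest)) ∘ (L + ·)) i = pvKeep rest i)]
    rw [List.map_map]
    apply List.map_congr_left
    intro i hi
    simp only [Function.comp]
    rw [getD_run, if_neg (by omega)]
    congr 1
    omega

theorem head?_dropWhile (p : Char → Bool) : ∀ (l : List Char) (d : Char),
    (l.dropWhile p).head? = some d → p d = false := by
  intro l
  induction l with
  | nil => intro d h; simp at h
  | cons x xs ih =>
    intro d h
    by_cases hx : p x
    · exact ih d (by simpa [List.dropWhile, hx] using h)
    · rw [List.dropWhile_cons_of_neg (by simpa using hx)] at h
      simp at h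
      subst h
      simpa using hx

theorem pvFilterList_eq_pvRunGo : ∀ (l : List Char), pvFilterList l = pvRunGo l := by
  intro l
  induction hn : l.length using Nat.strong_induction_on generalizing l with
  | _ n ih =>
    match l, hn with
    | [], _ => simp [pvFilterList, pvRunGo]
    | c :: rest, hn =>
      have hsplit : c :: rest
          = List.replicate ((rest.takeWhile (· == c)).length + 1) c
            ++ rest.dropWhile (· == c) := by
        rw [List.replicate_succ]
        have := takeWhile_eq_replicate c rest
        conv_lhs => rw [show rest = rest.takeWhile (· == c) ++ rest.dropWhile (· == c) from
          (List.takeWhile_append_dropWhile).symm]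
        rw [this]
        simp
      have hhead : ∀ d, (rest.dropWhile (· == c)).head? = some d → d ≠ c := by
        intro d hd
        have := head?_dropWhile (· == c) rest d hd
        simpa using this
      rw [hsplit, filterList_run _ c _ hhead (Nat.le_add_left 1 _)]
      have hlen : (rest.dropWhile (· == c)).length < n := by
        subst hn
        simp only [List.length_cons]
        exact Nat.lt_succ_of_le (List.length_dropWhile_le _ _)
      rw [ih _ hlen _ rfl]
      have hrg : pvRunGo (c :: rest)
          = (if (rest.takeWhile (· == c)).length + 1 ≤ 2
              then c :: rest.takeWhile (· == c) else [])
            ++ pvRunGo (rest.dropWhile (· == c)) := by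
        simp [pvRunGo]
      rw [← hsplit, hrg]
      have hrun : List.replicate ((rest.takeWhile (· == c)).length + 1) c
          = c :: rest.takeWhile (· == c) := by
        rw [List.replicate_succ]
        congr 1
        exact (takeWhile_eq_replicate c rest).symm
      rw [hrun]

-- ===== VERDICT (by name: the statement is the Claim_ definition above) =====
theorem remove_repeated_chars_spec : Claim_equal_remove_repeated_chars := by
  intro s _
  unfold Spec_remove_repeated_chars remove_repeated_chars
  rw [alt_eq_filterList, pvFilterList_eq_pvRunGo, pvLoopA_eq_pvRunGo]
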